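-- pv_equiv track=rewrite | github.com/slalom-ggp/dataops-tools | slalom/dataops/infra.py | _proper
-- ===== SOURCE A (Python) =====
-- SPECIAL_CASE_WORDS = ["AWS", "ECR", "ECS", "IAM", "VPC", "DBT", "EC2", "RDS", "MySQL"]
--
-- def _proper(str: str, title_case=True, special_case_words=None):
--     """
--     Return the same string in proper case, respected override rules for
--     acronyms and special-cased words.
--     """
--     special_case_words = special_case_words or SPECIAL_CASE_WORDS
--     word_lookup = {w.lower(): w for w in special_case_words}
--     if title_case:
--         str = str.title()
--     words = str.split(" ")
--     new_words = []
--     for word in words: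
--         new_subwords = []
--         for subword in word.split("-"):
--             new_subwords.append(word_lookup.get(subword.lower(), subword))
--         new_word = "-".join(new_subwords)
--         new_words.append(new_word)
--     return " ".join(new_words)
-- ===== SOURCE B (Python) =====
-- SPECIAL_CASE_WORDS = ["AWS", "ECR", "ECS", "IAM", "VPC", "DBT", "EC2", "RDS", "MySQL"]
--
-- def _proper(str: str, title_case=True, special_case_words=None):
--     """
--     Proper-case `str`, honouring acronym/special-word overrides: one flat
--     character pass that flushes each token at its ' '/'-' delimiter instead
--     of nested split/join loops.
--     """
--     special_case_words = special_case_words or SPECIAL_CASE_WORDS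
--     word_lookup = {w.lower(): w for w in special_case_words}
--     if title_case:
--         str = str.title()
--     out = []
--     tok = []
--     for ch in str:
--         if ch == " " or ch == "-":
--             t = "".join(tok)
--             out.append(word_lookup.get(t.lower(), t))
--             out.append(ch)
--             tok = []
--         else:
--             tok.append(ch)
--     t = "".join(tok)
--     out.append(word_lookup.get(t.lower(), t))
--     return "".join(out)
-- ===== Notes on version B (the rewrite author's own statement) =====
-- stated objective: alternative
-- what changed: Replaces the nested split-on-space/split-on-hyphen/join loops with a single flat character pass that flushes each token at a space or hyphen delimiter through the lookup dict and emits delimiters verbatim.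
import Mathlib
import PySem

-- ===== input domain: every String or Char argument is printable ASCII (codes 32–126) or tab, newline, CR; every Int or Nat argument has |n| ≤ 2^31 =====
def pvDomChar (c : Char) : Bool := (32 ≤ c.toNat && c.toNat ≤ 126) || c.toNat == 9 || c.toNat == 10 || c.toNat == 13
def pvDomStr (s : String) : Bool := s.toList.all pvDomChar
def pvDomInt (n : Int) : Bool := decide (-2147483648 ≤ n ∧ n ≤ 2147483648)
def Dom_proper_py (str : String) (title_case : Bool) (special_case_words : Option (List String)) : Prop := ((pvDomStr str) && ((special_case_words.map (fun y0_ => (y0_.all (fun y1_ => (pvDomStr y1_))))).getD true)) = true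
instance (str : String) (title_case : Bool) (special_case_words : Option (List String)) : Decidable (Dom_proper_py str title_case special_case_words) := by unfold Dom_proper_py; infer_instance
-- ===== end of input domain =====

-- B replaces A's nested split(" ")/split("-")/join loops by one flat character pass
-- that flushes each token at a space or hyphen delimiter (objective: alternative, same cost).

-- ===== PORT A =====
-- Shared context of both Pythons: the module constant, the `or`-falsy default,
-- the {w.lower(): w} dict, and str.title() (no PySem primitive; hand-ported:
-- an ASCII letter is uppercased after a non-letter and lowercased after a letter,
-- other characters are kept; exact on the ASCII domain).
def pvSpecialCaseWords : List String :=
  ["AWS", "ECR", "ECS", "IAM", "VPC", "DBT", "EC2", "RDS", "MySQL"]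

def pvWords (special_case_words : Option (List String)) : List String :=
  match special_case_words with
  | some l => if l.isEmpty then pvSpecialCaseWords else l
  | none => pvSpecialCaseWords

def pvLookup (words : List String) : PySem.Dict (List Char) (List Char) :=
  words.foldl (fun d w => d.insert (PySem.Chars.lower w.toList) w.toList) ⟨[]⟩

def pvTitleGo : Bool → List Char → List Char
  | _, [] => []
  | prev, c :: cs =>
    if PySem.Chars.isalpha c then
      (if prev then PySem.Chars.lowerChar c else PySem.Chars.upperChar c) :: pvTitleGo true cs
    else c :: pvTitleGo false cs

def proper_py (str : String) (title_case : Bool) (special_case_words : Option (List String)) : String :=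
  let word_lookup := pvLookup (pvWords special_case_words)
  let cs := if title_case then pvTitleGo false str.toList else str.toList
  let words := PySem.Chars.splitOn cs [' ']
  let new_words := words.map (fun word =>
    PySem.Chars.join ['-'] ((PySem.Chars.splitOn word ['-']).map
      (fun subword => word_lookup.getD (PySem.Chars.lower subword) subword)))
  String.ofList (PySem.Chars.join [' '] new_words)

-- ===== PORT B =====
-- flush the pending token through the lookup dict (`word_lookup.get(t.lower(), t)`)
def pvFlush (lookup : PySem.Dict (List Char) (List Char)) (tok : List Char) : List Char :=
  lookup.getD (PySem.Chars.lower tok) tok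

-- B's single pass: `tok` is the pending token, space/hyphen delimiters are emitted verbatim
def pvScan (lookup : PySem.Dict (List Char) (List Char)) : List Char → List Char → List Char
  | [], tok => pvFlush lookup tok
  | c :: cs, tok =>
    if c = ' ' ∨ c = '-' then pvFlush lookup tok ++ c :: pvScan lookup cs []
    else pvScan lookup cs (tok ++ [c])

def proper_py_alt (str : String) (title_case : Bool) (special_case_words : Option (List String)) : String :=
  let word_lookup := pvLookup (pvWords special_case_words)
  let cs := if title_case then pvTitleGo false str.toList else str.toList
  String.ofList (pvScan word_lookup cs [])

-- ===== PRECONDITION & SPEC =====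
def Spec_proper_py (str : String) (title_case : Bool) (special_case_words : Option (List String)) (out : String) : Prop := out = proper_py_alt str title_case special_case_words
instance (str : String) (title_case : Bool) (special_case_words : Option (List String)) (out : String) : Decidable (Spec_proper_py str title_case special_case_words out) := by unfold Spec_proper_py; infer_instance

-- ===== CLAIM (what is proved, stated in full; the proofs are below) =====
def Claim_equal_proper_py : Prop := ∀ (str : String) (title_case : Bool) (special_case_words : Option (List String)), Dom_proper_py str title_case special_case_words → Spec_proper_py str title_case special_case_words (proper_py str title_case special_case_words)

-- ===== LEMMAS AND PROOFS =====

-- structural form of Python's split on a single-character separator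
def pvSplitC (d : Char) : List Char → List (List Char)
  | [] => [[]]
  | c :: cs => if c = d then [] :: pvSplitC d cs else (pvSplitC d cs).modifyHead (c :: ·)

theorem pvSplitC_ne_nil (d : Char) (l : List Char) : pvSplitC d l ≠ [] := by
  cases l with
  | nil => simp [pvSplitC]
  | cons c cs =>
    simp only [pvSplitC]
    split_ifs
    · simp
    · cases h : pvSplitC d cs with
      | nil => exact absurd h (pvSplitC_ne_nil d cs)
      | cons x xs => simp

theorem pv_go_single (d : Char) : ∀ (l : List Char) (fuel : Nat) (cur : List Char)
    (acc : List (List Char)), l.length < fuel →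
    PySem.Chars.splitOn.go [d] fuel l cur acc
      = acc.reverse ++ (pvSplitC d l).modifyHead (cur.reverse ++ ·) := by
  intro l
  induction l with
  | nil =>
    intro fuel cur acc hf
    cases fuel with
    | zero => omega
    | succ n => simp [PySem.Chars.splitOn.go, pvSplitC]
  | cons c cs ih =>
    intro fuel cur acc hf
    cases fuel with
    | zero => omega
    | succ n =>
      by_cases hc : c = d
      · subst hc
        have : [c].isPrefixOf (c :: cs) = true := by simp [List.isPrefixOf]
        simp only [PySem.Chars.splitOn.go, this, if_pos, List.length_cons,
          List.length_nil, Nat.zero_add, List.drop_succ_cons, List.drop_zero] at *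
        rw [ih n [] (cur.reverse :: acc) (by simpa using hf)]
        cases h : pvSplitC c cs with
        | nil => exact absurd h (pvSplitC_ne_nil c cs)
        | cons x xs => simp [pvSplitC, h]
      · have : [d].isPrefixOf (c :: cs) = false := by
          simp [List.isPrefixOf]
          exact fun h => hc h.symm
        simp only [PySem.Chars.splitOn.go, this, Bool.false_eq_true, if_false] at *
        rw [ih n (c :: cur) acc (by simp at hf ⊢; omega)]
        cases h : pvSplitC d cs with
        | nil => exact absurd h (pvSplitC_ne_nil d cs)
        | cons x xs => simp [pvSplitC, h, hc]

theorem pv_splitOn_single (d : Char) (l : List Char) :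
    PySem.Chars.splitOn l [d] = pvSplitC d l := by
  unfold PySem.Chars.splitOn
  rw [pv_go_single d l (l.length + 1) [] [] (by omega)]
  cases h : pvSplitC d l with
  | nil => exact absurd h (pvSplitC_ne_nil d l)
  | cons x xs => simp

theorem pvSplitC_free_append (d : Char) (u v : List Char) (h : d ∉ u) :
    pvSplitC d (u ++ v) = (pvSplitC d v).modifyHead (u ++ ·) := by
  induction u with
  | nil =>
    cases hh : pvSplitC d v with
    | nil => exact absurd hh (pvSplitC_ne_nil d v)
    | cons x xs => simp [hh]
  | cons c u ih =>
    have hc : c ≠ d := fun hcd => h (by simp [hcd])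
    have hu : d ∉ u := fun hm => h (by simp [hm])
    simp only [List.cons_append, pvSplitC, hc, if_false, ih hu]
    cases hh : pvSplitC d v with
    | nil => exact absurd hh (pvSplitC_ne_nil d v)
    | cons x xs => simp

theorem pvSplitC_free (d : Char) (u : List Char) (h : d ∉ u) : pvSplitC d u = [u] := by
  have := pvSplitC_free_append d u [] h
  simpa [pvSplitC] using this

theorem pvSplitC_free_cons (d : Char) (u v : List Char) (h : d ∉ u) :
    pvSplitC d (u ++ d :: v) = u :: pvSplitC d v := by
  rw [pvSplitC_free_append d u (d :: v) h]
  simp [pvSplitC]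

-- A's per-word processing, on the structural split
def pvProcWord (lookup : PySem.Dict (List Char) (List Char)) (w : List Char) : List Char :=
  PySem.Chars.join ['-'] ((pvSplitC '-' w).map (pvFlush lookup))

def pvProc (lookup : PySem.Dict (List Char) (List Char)) (cs : List Char) : List Char :=
  PySem.Chars.join [' '] ((pvSplitC ' ' cs).map (pvProcWord lookup))

theorem pvProcWord_free (lookup : PySem.Dict (List Char) (List Char)) (w : List Char)
    (h : '-' ∉ w) : pvProcWord lookup w = pvFlush lookup w := by
  simp [pvProcWord, pvSplitC_free '-' w h, PySem.Chars.join_singleton]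

theorem pvProcWord_cons (lookup : PySem.Dict (List Char) (List Char)) (tok w : List Char)
    (h : '-' ∉ tok) :
    pvProcWord lookup (tok ++ '-' :: w) = pvFlush lookup tok ++ '-' :: pvProcWord lookup w := by
  unfold pvProcWord
  rw [pvSplitC_free_cons '-' tok w h]
  cases hh : pvSplitC '-' w with
  | nil => exact absurd hh (pvSplitC_ne_nil '-' w)
  | cons x xs => simp [PySem.Chars.join_cons_cons]

theorem pvScan_eq (lookup : PySem.Dict (List Char) (List Char)) :
    ∀ (cs tok : List Char), ' ' ∉ tok → '-' ∉ tok →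
    pvScan lookup cs tok = pvProc lookup (tok ++ cs) := by
  intro cs
  induction cs with
  | nil =>
    intro tok hs hd
    simp only [pvScan, List.append_nil, pvProc]
    rw [pvSplitC_free ' ' tok hs]
    simp [PySem.Chars.join_singleton, pvProcWord_free lookup tok hd]
  | cons c cs ih =>
    intro tok hs hd
    by_cases hc : c = ' ' ∨ c = '-'
    · rcases hc with hc | hc <;> subst hc
      · -- space delimiter
        simp only [pvScan, if_pos]
        rw [ih [] (by simp) (by simp), pvProc, pvProc,
          pvSplitC_free_cons ' ' tok cs hs]
        cases hh : pvSplitC ' ' cs with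
        | nil => exact absurd hh (pvSplitC_ne_nil ' ' cs)
        | cons x xs =>
          simp [hh, PySem.Chars.join_cons_cons, pvProcWord_free lookup tok hd]
      · -- hyphen delimiter
        simp only [pvScan, if_pos]
        rw [ih [] (by simp) (by simp), pvProc, pvProc,
          show tok ++ '-' :: cs = (tok ++ ['-']) ++ cs by simp,
          pvSplitC_free_append ' ' (tok ++ ['-']) cs
            (by simp; exact fun h => hs (by simpa using h))]
        cases hh : pvSplitC ' ' cs with
        | nil => exact absurd hh (pvSplitC_ne_nil ' ' cs)
        | cons x xs =>
          simp only [List.modifyHead, List.map_cons, List.append_assoc, List.singleton_append,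
            pvProcWord_cons lookup tok x hd]
          cases xs with
          | nil => simp [hh, PySem.Chars.join_singleton]
          | cons y ys => simp [hh, PySem.Chars.join_cons_cons]
    · push_neg at hc
      have h1 : ' ' ∉ tok ++ [c] := by
        intro h
        rcases List.mem_append.1 h with h | h
        · exact hs h
        · simp at h; exact hc.1 h.symm
      have h2 : '-' ∉ tok ++ [c] := by
        intro h
        rcases List.mem_append.1 h with h | h
        · exact hd h
        · simp at h; exact hc.2 h.symm
      simp only [pvScan]
      split_ifs with hif
      · exact absurd hif (by tauto)
      · rw [ih (tok ++ [c]) h1 h2]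
        simp

-- ===== VERDICT (by name: the statement is the Claim_ definition above) =====
theorem proper_py_spec : Claim_equal_proper_py := by
  intro str title_case special_case_words _
  unfold Spec_proper_py proper_py proper_py_alt
  dsimp only
  rw [pvScan_eq _ _ [] (by simp) (by simp)]
  simp only [pv_splitOn_single, List.nil_append, pvProc]
  congr 2
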